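-- pv_equiv track=rewrite | github.com/wanfaliang/Edgar-normalization | map_cash_flow.py | classify_item_section
-- ===== SOURCE A (Python) =====
-- def classify_item_section(line_num, control_lines):
--     """
--     Classify item into operating/investing/financing based on line position
--
--     The control items mark the END of their respective sections.
--     Items up to and including each control item belong to that section.
--
--     Args:
--         line_num: Line number of the item
--         control_lines: Dict with operating/investing/financing line numbers
--
--     Returns:
--         'operating' | 'investing' | 'financing' | 'supplemental'
--     """
--     if not control_lines:
--         return 'unknown'
--
--     # Sort control items by line number to handle any order
--     sorted_controls = sorted(control_lines.items(), key=lambda x: x[1])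
--
--     # Find which section this line belongs to
--     for section, control_line in sorted_controls:
--         if line_num <= control_line:
--             return section
--
--     # If after all control items, it's supplemental (e.g., cash at end)
--     return 'supplemental'
-- ===== SOURCE B (Python) =====
-- def classify_item_section(line_num, control_lines):
--     if not control_lines:
--         return 'unknown'
--     candidates = [(s, c) for s, c in control_lines.items() if line_num <= c]
--     if not candidates:
--         return 'supplemental'
--     return min(candidates, key=lambda x: x[1])[0]
-- ===== Notes on version B (the rewrite author's own statement) =====
-- stated objective: simpler
-- what changed: Replaces the O(n log n) sort-then-scan with a single filter of qualifying control lines followed by min(..., key) in original dict order, whose first-minimal tie-break matches the stable sort.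
import Mathlib
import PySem

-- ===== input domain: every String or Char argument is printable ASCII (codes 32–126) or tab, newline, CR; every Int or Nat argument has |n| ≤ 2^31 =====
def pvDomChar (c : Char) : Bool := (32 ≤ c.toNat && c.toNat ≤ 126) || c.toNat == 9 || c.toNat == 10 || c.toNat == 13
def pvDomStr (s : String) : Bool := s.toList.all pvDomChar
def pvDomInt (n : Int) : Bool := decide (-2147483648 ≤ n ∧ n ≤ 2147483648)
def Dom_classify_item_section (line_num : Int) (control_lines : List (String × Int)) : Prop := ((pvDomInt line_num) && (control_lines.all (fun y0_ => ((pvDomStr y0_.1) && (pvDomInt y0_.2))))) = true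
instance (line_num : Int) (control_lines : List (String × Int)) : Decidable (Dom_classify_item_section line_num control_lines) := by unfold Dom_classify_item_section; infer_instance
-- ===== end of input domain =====

-- B replaces the sort-then-scan with a single filter + first-minimum pass (simpler, one pass over the dict).


-- ===== PORT A =====
-- the 'for section, control_line in sorted_controls' loop with its early return
def pvScanA (line_num : Int) : List (String × Int) → String
  | [] => "supplemental"
  | x :: t => if line_num ≤ x.2 then x.1 else pvScanA line_num t

def classify_item_section (line_num : Int) (control_lines : List (String × Int)) : String :=
  if control_lines = [] then "unknown"
  else pvScanA line_num (PySem.List.sorted control_lines (fun x => x.2) false)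

-- ===== PORT B =====
def classify_item_section_alt (line_num : Int) (control_lines : List (String × Int)) : String :=
  if control_lines = [] then "unknown"
  else
    match PySem.List.min? (control_lines.filter (fun x => decide (line_num ≤ x.2))) (fun x => x.2) with
    | none => "supplemental"     -- empty candidate list
    | some m => m.1

-- ===== PRECONDITION & SPEC =====
def Spec_classify_item_section (line_num : Int) (control_lines : List (String × Int)) (out : String) : Prop := out = classify_item_section_alt line_num control_lines
instance (line_num : Int) (control_lines : List (String × Int)) (out : String) : Decidable (Spec_classify_item_section line_num control_lines out) := by unfold Spec_classify_item_section; infer_instance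

-- ===== CLAIM (what is proved, stated in full; the proofs are below) =====
def Claim_equal_classify_item_section : Prop := ∀ (line_num : Int) (control_lines : List (String × Int)), Dom_classify_item_section line_num control_lines → Spec_classify_item_section line_num control_lines (classify_item_section line_num control_lines)

-- ===== LEMMAS AND PROOFS =====

-- first element with line_num ≤ key, as an Option
def pvFirstP (ln : Int) : List (String × Int) → Option (String × Int)
  | [] => none
  | x :: t => if ln ≤ x.2 then some x else pvFirstP ln t

-- one foldl step combining candidacy test and running first-minimum
def pvStep (ln : Int) (o : Option (String × Int)) (x : String × Int) : Option (String × Int) :=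
  if ln ≤ x.2 then
    match o with
    | none => some x
    | some m => if x.2 < m.2 then some x else some m
  else o

theorem pvInsertBy_nil (x : String × Int) (b : (String × Int) → (String × Int) → Bool) :
    PySem.List.insertBy b x [] = [x] := rfl

theorem pvInsertBy_cons (x y : String × Int) (ys : List (String × Int)) (b : (String × Int) → (String × Int) → Bool) :
    PySem.List.insertBy b x (y :: ys) =
      if b x y then x :: y :: ys else y :: PySem.List.insertBy b x ys := rfl

theorem pvMem_insertBy (x z : String × Int) (ys : List (String × Int)) (b : (String × Int) → (String × Int) → Bool)
    (h : z ∈ PySem.List.insertBy b x ys) : z = x ∨ z ∈ ys := by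
  induction ys with
  | nil =>
    rw [pvInsertBy_nil] at h
    simp only [List.mem_singleton] at h
    exact Or.inl h
  | cons y t ih =>
    rw [pvInsertBy_cons] at h
    by_cases hb : b x y
    · rw [if_pos hb] at h
      simp only [List.mem_cons] at h
      rcases h with h | h | h
      · exact Or.inl h
      · exact Or.inr (by simp [h])
      · exact Or.inr (by simp [h])
    · rw [if_neg hb] at h
      simp only [List.mem_cons] at h
      rcases h with h | h
      · exact Or.inr (by simp [h])
      · rcases ih h with h | h
        · exact Or.inl h
        · exact Or.inr (by simp [h])

theorem pvFirstP_mem (ln : Int) (l : List (String × Int)) (m : String × Int)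
    (h : pvFirstP ln l = some m) : m ∈ l := by
  induction l with
  | nil => simp [pvFirstP] at h
  | cons z s ih =>
    simp only [pvFirstP] at h
    split at h
    · simp [(Option.some_inj.mp h).symm]
    · simp [ih h]

theorem pvPairwise_insertBy (x : String × Int) (acc : List (String × Int))
    (h : acc.Pairwise (fun a b => a.2 ≤ b.2)) :
    (PySem.List.insertBy (fun a b => decide (a.2 < b.2)) x acc).Pairwise (fun a b => a.2 ≤ b.2) := by
  induction acc with
  | nil =>
    rw [pvInsertBy_nil]
    simp
  | cons y t ih =>
    rw [pvInsertBy_cons]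
    rcases List.pairwise_cons.mp h with ⟨hy, ht⟩
    by_cases hlt : x.2 < y.2
    · rw [if_pos (by simpa using hlt)]
      refine List.pairwise_cons.mpr ⟨?_, h⟩
      intro z hz
      simp only [List.mem_cons] at hz
      rcases hz with rfl | hz
      · omega
      · have := hy z hz
        omega
    · rw [if_neg (by simpa using hlt)]
      refine List.pairwise_cons.mpr ⟨?_, ih ht⟩
      intro z hz
      rcases pvMem_insertBy x z t _ hz with rfl | h1
      · omega
      · exact hy z h1

theorem pvFirstP_insertBy (ln : Int) (x : String × Int) (acc : List (String × Int))
    (h : acc.Pairwise (fun a b => a.2 ≤ b.2)) :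
    pvFirstP ln (PySem.List.insertBy (fun a b => decide (a.2 < b.2)) x acc) =
      pvStep ln (pvFirstP ln acc) x := by
  induction acc with
  | nil =>
    rw [pvInsertBy_nil]
    simp [pvFirstP, pvStep]
  | cons y t ih =>
    rcases List.pairwise_cons.mp h with ⟨hy, ht⟩
    rw [pvInsertBy_cons]
    by_cases hlt : x.2 < y.2
    · rw [if_pos (by simpa using hlt)]
      by_cases hpx : ln ≤ x.2
      · -- x is a candidate and has a strictly smaller key than everything in acc
        have lhs : pvFirstP ln (x :: y :: t) = some x := by simp [pvFirstP, hpx]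
        rw [lhs]
        unfold pvStep
        rw [if_pos hpx]
        cases hfy : pvFirstP ln (y :: t) with
        | none => rfl
        | some m =>
          have hm := pvFirstP_mem ln (y :: t) m hfy
          simp only [List.mem_cons] at hm
          have hym : y.2 ≤ m.2 := by
            rcases hm with rfl | hm
            · omega
            · exact hy m hm
          have hxm : x.2 < m.2 := by omega
          simp [hxm]
      · -- x is not a candidate: it is skipped on both sides
        have lhs : pvFirstP ln (x :: y :: t) = pvFirstP ln (y :: t) := by
          simp [pvFirstP, hpx]
        rw [lhs]
        unfold pvStep
        rw [if_neg hpx]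
    · rw [if_neg (by simpa using hlt)]
      by_cases hpy : ln ≤ y.2
      · -- y answers on both sides (x's key is not smaller than y's)
        have lhs : pvFirstP ln (y :: PySem.List.insertBy (fun a b => decide (a.2 < b.2)) x t) = some y := by
          simp [pvFirstP, hpy]
        have rhs : pvFirstP ln (y :: t) = some y := by simp [pvFirstP, hpy]
        rw [lhs, rhs]
        unfold pvStep
        by_cases hpx : ln ≤ x.2
        · rw [if_pos hpx]
          have hxy : ¬ x.2 < y.2 := hlt
          simp [hxy]
        · rw [if_neg hpx]
      · have lhs : pvFirstP ln (y :: PySem.List.insertBy (fun a b => decide (a.2 < b.2)) x t) =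
            pvFirstP ln (PySem.List.insertBy (fun a b => decide (a.2 < b.2)) x t) := by
          simp [pvFirstP, hpy]
        have rhs : pvFirstP ln (y :: t) = pvFirstP ln t := by simp [pvFirstP, hpy]
        rw [lhs, rhs, ih ht]

theorem pvFirstP_foldl (ln : Int) (xs acc : List (String × Int))
    (h : acc.Pairwise (fun a b => a.2 ≤ b.2)) :
    pvFirstP ln (xs.foldl (fun acc x => PySem.List.insertBy (fun a b => decide (a.2 < b.2)) x acc) acc) =
      xs.foldl (pvStep ln) (pvFirstP ln acc) := by
  induction xs generalizing acc with
  | nil => rfl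
  | cons x t ih =>
    simp only [List.foldl_cons]
    rw [ih _ (pvPairwise_insertBy x acc h), pvFirstP_insertBy ln x acc h]

-- the running first-minimum step of Python's min(..., key)
def pvMinStep (o : Option (String × Int)) (x : String × Int) : Option (String × Int) :=
  match o with
  | none => some x
  | some m => if x.2 < m.2 then some x else some m

theorem pvMin?_eq (l : List (String × Int)) :
    PySem.List.min? l (fun x => x.2) = l.foldl pvMinStep none := by
  simp only [PySem.List.min?]
  congr 1
  funext o x
  cases o <;> rfl

theorem pvFoldl_filter (ln : Int) (xs : List (String × Int)) (o : Option (String × Int)) :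
    xs.foldl (pvStep ln) o =
      (xs.filter (fun x => decide (ln ≤ x.2))).foldl pvMinStep o := by
  induction xs generalizing o with
  | nil => rfl
  | cons x t ih =>
    by_cases hx : ln ≤ x.2
    · simp only [List.foldl_cons, List.filter_cons, hx, decide_true, if_true, pvStep]
      rw [ih]
      congr 1
    · simp only [List.foldl_cons, List.filter_cons, hx, decide_false, Bool.false_eq_true, if_false]
      simp only [pvStep, if_neg hx]
      exact ih o

theorem pvScanA_eq (ln : Int) (l : List (String × Int)) :
    pvScanA ln l = match pvFirstP ln l with
      | none => "supplemental"
      | some m => m.1 := by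
  induction l with
  | nil => rfl
  | cons x t ih =>
    simp only [pvScanA, pvFirstP]
    split <;> simp [ih]

theorem pvMain (ln : Int) (cl : List (String × Int)) :
    pvFirstP ln (PySem.List.sorted cl (fun x => x.2) false) =
      PySem.List.min? (cl.filter (fun x => decide (ln ≤ x.2))) (fun x => x.2) := by
  rw [PySem.List.sorted_eq_foldl_insertBy]
  rw [pvFirstP_foldl ln cl [] (by simp), pvMin?_eq]
  exact pvFoldl_filter ln cl none

-- ===== VERDICT (by name: the statement is the Claim_ definition above) =====
theorem classify_item_section_spec : Claim_equal_classify_item_section := by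
  intro ln cl _
  unfold Spec_classify_item_section classify_item_section classify_item_section_alt
  by_cases h : cl = []
  · simp [h]
  · simp only [h, if_false]
    rw [pvScanA_eq, pvMain]
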